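-- pv_equiv track=rewrite | github.com/Leandroglez39/RoughSetsConsensusClustering | src/consensus_signed.py | find_overlapping_nodes
-- ===== SOURCE A (Python) =====
-- from typing import List, Set, Tuple
-- from typing import List, Set, Dict
--
-- def find_overlapping_nodes(
--     coverage_inferior: List[Set[int]],
--     coverage_superior: List[Set[int]]
-- ) -> Dict[int, List[int]]:
--     """
--     Encuentra los nodos que aparecen en 2 o más comunidades (solapamiento),
--     considerando coverage_inferior y coverage_superior.
--
--     Devuelve: {nodo: [índices de comunidades]}
--     """
--     node_to_communities: Dict[int, List[int]] = {}
--
--     for idx, (inf_set, sup_set) in enumerate(zip(coverage_inferior, coverage_superior)):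
--         combined = inf_set.union(sup_set)
--         for node in combined:
--             node_to_communities.setdefault(node, []).append(idx)
--
--     overlapping = {node: comms for node, comms in node_to_communities.items() if len(comms) > 1}
--     return overlapping
-- ===== SOURCE B (Python) =====
-- def find_overlapping_nodes(coverage_inferior, coverage_superior):
--     # Precompute each community's union once, then for every distinct node
--     # scan the unions to collect its community indices.
--     unions = [set(a) | set(b) for a, b in zip(coverage_inferior, coverage_superior)]
--     nodes = set()
--     for u in unions:
--         nodes.update(u)
--     result = {}
--     for node in nodes:
--         idxs = [i for i, u in enumerate(unions) if node in u]
--         if len(idxs) > 1: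
--             result[node] = idxs
--     return result
-- ===== Notes on version B (the rewrite author's own statement) =====
-- stated objective: alternative
-- what changed: A builds the node-to-indices dict incrementally in one pass with setdefault/append; B precomputes the per-community unions, collects the distinct nodes, and then for each node scans the union table to build its index list, keeping only nodes with more than one index.
import Mathlib
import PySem

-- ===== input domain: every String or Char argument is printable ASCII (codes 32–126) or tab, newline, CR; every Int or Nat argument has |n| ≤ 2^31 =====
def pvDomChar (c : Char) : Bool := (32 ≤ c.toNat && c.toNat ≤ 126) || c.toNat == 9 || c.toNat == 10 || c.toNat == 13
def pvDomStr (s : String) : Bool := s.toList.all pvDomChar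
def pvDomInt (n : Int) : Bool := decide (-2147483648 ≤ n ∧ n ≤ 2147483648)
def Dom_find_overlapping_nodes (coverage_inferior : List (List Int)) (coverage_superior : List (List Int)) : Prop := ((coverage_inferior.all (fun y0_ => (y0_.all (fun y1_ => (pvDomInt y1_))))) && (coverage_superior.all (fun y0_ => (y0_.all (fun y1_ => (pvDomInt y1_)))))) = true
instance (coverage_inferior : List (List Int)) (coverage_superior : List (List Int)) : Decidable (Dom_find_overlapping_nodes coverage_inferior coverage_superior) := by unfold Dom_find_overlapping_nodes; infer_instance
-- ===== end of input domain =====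

-- B replaces A's incremental setdefault/append dict build with a precomputed union table
-- scanned once per distinct node (alternative decomposition, similar cost).


-- ===== PORT A =====
def find_overlapping_nodes (coverage_inferior : List (List Int)) (coverage_superior : List (List Int)) : List (Int × List Int) :=
  -- node_to_communities built over enumerate(zip(...)); setdefault(node, []).append(idx) is Dict.modify node [] (· ++ [idx])
  let node_to_communities : PySem.Dict Int (List Int) :=
    (PySem.List.enumerate (coverage_inferior.zip coverage_superior) 0).foldl
      (fun d p =>
        let combined := PySem.Set.union (PySem.Set.ofList p.2.1) p.2.2
        combined.foldl (fun d node => d.modify node [] (· ++ [p.1])) d)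
      PySem.Dict.empty
  (node_to_communities.items.filter (fun q => decide (1 < q.2.length)))

-- ===== PORT B =====
def find_overlapping_nodes_alt (coverage_inferior : List (List Int)) (coverage_superior : List (List Int)) : List (Int × List Int) :=
  let unions : List (PySem.Set Int) :=
    (coverage_inferior.zip coverage_superior).map
      (fun p => PySem.Set.union (PySem.Set.ofList p.1) p.2)
  let nodes : PySem.Set Int := unions.foldl (fun s u => PySem.Set.update s u) PySem.Set.empty
  let result : PySem.Dict Int (List Int) :=
    nodes.foldl
      (fun d node =>
        let idxs := (PySem.List.enumerate unions 0).filterMap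
          (fun q => if PySem.Set.contains q.2 node then some q.1 else none)
        if 1 < idxs.length then d.insert node idxs else d)
      PySem.Dict.empty
  result.items

-- ===== PRECONDITION & SPEC =====
def Spec_find_overlapping_nodes (coverage_inferior : List (List Int)) (coverage_superior : List (List Int)) (out : List (Int × List Int)) : Prop := out = find_overlapping_nodes_alt coverage_inferior coverage_superior
instance (coverage_inferior : List (List Int)) (coverage_superior : List (List Int)) (out : List (Int × List Int)) : Decidable (Spec_find_overlapping_nodes coverage_inferior coverage_superior out) := by unfold Spec_find_overlapping_nodes; infer_instance

-- ===== CLAIM (what is proved, stated in full; the proofs are below) =====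
def Claim_equal_find_overlapping_nodes : Prop := ∀ (coverage_inferior : List (List Int)) (coverage_superior : List (List Int)), Dom_find_overlapping_nodes coverage_inferior coverage_superior → Spec_find_overlapping_nodes coverage_inferior coverage_superior (find_overlapping_nodes coverage_inferior coverage_superior)

-- ===== LEMMAS AND PROOFS =====
lemma enum_map {α β : Type} (f : α → β) (l : List α) (s : Int) :
    PySem.List.enumerate (l.map f) s = (PySem.List.enumerate l s).map (fun p => (p.1, f p.2)) := by
  induction l generalizing s with
  | nil => simp [PySem.List.enumerate_nil]
  | cons x xs ih => simp [PySem.List.enumerate_cons, ih]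

lemma foldl_update_flatten (U : List (List Int)) (s : PySem.Set Int) :
    U.foldl (fun s u => PySem.Set.update s u) s = PySem.Set.update s U.flatten := by
  induction U generalizing s with
  | nil => simp [PySem.Set.update]
  | cons u U ih => simp [List.flatten_cons, PySem.Set.update_append, ih]

lemma foldl_insert_cond (P : Int → Prop) [DecidablePred P] (v : Int → List Int) (ns : List Int)
    (d : PySem.Dict Int (List Int)) (hn : ns.Nodup) (hf : ∀ n ∈ ns, d.contains n = false) :
    (ns.foldl (fun d n => if P n then d.insert n (v n) else d) d).items
      = d.items ++ (ns.filter (fun n => decide (P n))).map (fun n => (n, v n)) := by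
  induction ns generalizing d with
  | nil => simp
  | cons n ns ih =>
    have hfresh : d.contains n = false := hf n (List.mem_cons_self ..)
    have hns : ns.Nodup := hn.of_cons
    have hnot : n ∉ ns := (List.nodup_cons.mp hn).1
    by_cases hP : P n
    · simp only [List.foldl_cons, if_pos hP]
      rw [ih _ hns (fun m hm => by
        rw [PySem.Dict.contains_insert]
        have : (m == n) = false := beq_false_of_ne (fun h => hnot (h ▸ hm))
        simp [this, hf m (List.mem_cons_of_mem _ hm)])]
      rw [PySem.Dict.items_insert_of_not_contains _ _ hfresh]
      simp [hP]
    · simp only [List.foldl_cons, if_neg hP]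
      rw [ih _ hns (fun m hm => hf m (List.mem_cons_of_mem _ hm))]
      simp [hP]

lemma core_idxs (E : List (Int × List Int)) (n : Int) (h : ∀ q ∈ E, q.2.Nodup) :
    ((E.flatMap (fun q => q.2.map (fun m => (m, q.1)))).filter (fun r => r.1 == n)).map (·.2)
      = E.filterMap (fun q => if PySem.Set.contains q.2 n then some q.1 else none) := by
  induction E with
  | nil => simp
  | cons q E ih =>
    simp only [List.flatMap_cons, List.filter_append, List.map_append, List.filterMap_cons]
    rw [ih (fun r hr => h r (List.mem_cons_of_mem _ hr))]
    have hq : q.2.Nodup := h q (List.mem_cons_self ..)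
    have : ((q.2.map (fun m => (m, q.1))).filter (fun r => r.1 == n)).map (·.2)
        = if PySem.Set.contains q.2 n then [q.1] else [] := by
      rw [List.filter_map]
      have hcomp : ((fun r => r.1 == n) ∘ (fun m : Int => (m, q.1))) = fun m => m == n := rfl
      rw [hcomp, List.filter_beq, PySem.Set.contains_eq_listContains]
      by_cases hm : n ∈ q.2
      · rw [List.count_eq_one_of_mem hq hm]
        simp [hm]
      · rw [List.count_eq_zero_of_not_mem hm]
        simp [hm]
    rw [this]
    by_cases hm : n ∈ q.2 <;>
      simp [PySem.Set.contains_eq_listContains, List.contains_eq_mem, hm]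

theorem main_eq (ci cs : List (List Int)) :
    find_overlapping_nodes ci cs = find_overlapping_nodes_alt ci cs := by
  simp only [find_overlapping_nodes, find_overlapping_nodes_alt]
  set U : List (PySem.Set Int) :=
    (ci.zip cs).map (fun p => PySem.Set.union (PySem.Set.ofList p.1) p.2) with hUdef
  set E := PySem.List.enumerate U 0 with hEdef
  set P := E.flatMap (fun q => q.2.map (fun m => (m, q.1))) with hPdef
  -- A's dict as a flat fold
  have hEm : E = (PySem.List.enumerate (ci.zip cs) 0).map
      (fun p => (p.1, PySem.Set.union (PySem.Set.ofList p.2.1) p.2.2)) := by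
    rw [hEdef, hUdef, enum_map]
  have hdA :
      (PySem.List.enumerate (ci.zip cs) 0).foldl
        (fun d p =>
          (PySem.Set.union (PySem.Set.ofList p.2.1) p.2.2).foldl
            (fun d node => d.modify node [] (· ++ [p.1])) d)
        PySem.Dict.empty
      = P.foldl (fun d r => d.modify r.1 [] (· ++ [r.2])) PySem.Dict.empty := by
    rw [hPdef, List.foldl_flatMap, hEm, List.foldl_map]
    simp only [List.foldl_map]
  set dA := P.foldl (fun d r => d.modify r.1 [] (· ++ [r.2])) PySem.Dict.empty with hdAdef
  have hUnodup : ∀ u ∈ U, List.Nodup u := by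
    intro u hu
    rw [hUdef] at hu
    obtain ⟨p, _, rfl⟩ := List.mem_map.mp hu
    exact PySem.Set.nodup_union _ _ (PySem.Set.nodup_ofList _)
  have hEnodup : ∀ q ∈ E, List.Nodup q.2 := by
    intro q hq
    have : q.2 ∈ E.map (fun x => x.2) := List.mem_map_of_mem hq
    rw [hEdef, PySem.List.map_snd_enumerate] at this
    exact hUnodup _ this
  -- getD characterization
  have hgetD : ∀ n : Int, dA.getD n [] = E.filterMap
      (fun q => if PySem.Set.contains q.2 n then some q.1 else none) := by
    intro n
    rw [hdAdef, PySem.Dict.getD_foldl_modify_append, PySem.Dict.getD_empty]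
    rw [List.nil_append]
    exact core_idxs E n hEnodup
  -- keys
  have hkeysA : dA.keys = PySem.Set.ofList U.flatten := by
    rw [hdAdef]
    rw [PySem.Dict.keys_foldl_modify_key P (fun r => r.1) [] (fun _ r => (· ++ [r.2]))]
    rw [PySem.Dict.keys_empty, PySem.Set.update_nil_left]
    congr 1
    rw [hPdef]
    simp only [List.map_flatMap, Function.comp_def, List.map_map, List.map_id']
    rw [List.flatMap_def, hEdef, PySem.List.map_snd_enumerate]
  have hkeysnodup : dA.keys.Nodup := by
    rw [hdAdef]
    exact PySem.Dict.nodup_keys_foldl_modify_key _ _ _ _ _ (by simp [PySem.Dict.keys_empty])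
  have hitemsA : dA.items = dA.keys.map (fun k => (k, dA.getD k [])) :=
    PySem.Dict.items_eq_map_keys dA hkeysnodup []
  -- B's nodes
  have hnodes : U.foldl (fun s u => PySem.Set.update s u) PySem.Set.empty
      = PySem.Set.ofList U.flatten := by
    rw [foldl_update_flatten]
    exact PySem.Set.update_nil_left _
  rw [hdA, hitemsA, hkeysA, hnodes, List.filter_map]
  rw [foldl_insert_cond
        (fun n => 1 < ((PySem.List.enumerate U 0).filterMap
          (fun q => if PySem.Set.contains q.2 n then some q.1 else none)).length)
        (fun n => (PySem.List.enumerate U 0).filterMap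
          (fun q => if PySem.Set.contains q.2 n then some q.1 else none))
        (PySem.Set.ofList U.flatten) PySem.Dict.empty
        (PySem.Set.nodup_ofList _)
        (fun n _ => PySem.Dict.contains_empty n)]
  have hie : (PySem.Dict.empty : PySem.Dict Int (List Int)).items = [] := rfl
  rw [hie, List.nil_append]
  simp only [Function.comp_def, hgetD]
  rfl

-- ===== VERDICT (by name: the statement is the Claim_ definition above) =====
theorem find_overlapping_nodes_spec : Claim_equal_find_overlapping_nodes := by
  intro ci cs _
  show find_overlapping_nodes ci cs = find_overlapping_nodes_alt ci cs
  exact main_eq ci cs
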